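-- pv_equiv track=rewrite | github.com/pugel/resume_projects | school_projects/OOP Python Project - Beginner Level/restaurant_sim.py | link_food_with_number
-- ===== SOURCE A (Python) =====
-- meals_dict_global = {"Chicken Salad Sandwich": 3, "Turkey Sandwich": 4, \
--                     "Asparagus Soup": 4, "Tortilla Soup": 3, "Harvest Salad": 4}
--
-- def link_food_with_number(food_order):
--     count = 1
--     while count <= len(meals_dict_global.keys()):
--         for item in meals_dict_global.keys():
--             if count == int(food_order):
--                 return item
--                 break
--             else:
--                 count += 1
-- ===== SOURCE B (Python) =====
-- meals_dict_global = {"Chicken Salad Sandwich": 3, "Turkey Sandwich": 4, \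
--                     "Asparagus Soup": 4, "Tortilla Soup": 3, "Harvest Salad": 4}
--
-- def link_food_with_number(food_order):
--     n = int(food_order)
--     keys = list(meals_dict_global.keys())
--     return keys[n - 1] if 1 <= n <= len(keys) else None
-- ===== Notes on version B (the rewrite author's own statement) =====
-- stated objective: simpler
-- what changed: Replaces the counter-driven while/for scan over the dict keys with a single bounds check and direct list indexing keys[n-1].
import Mathlib
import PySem

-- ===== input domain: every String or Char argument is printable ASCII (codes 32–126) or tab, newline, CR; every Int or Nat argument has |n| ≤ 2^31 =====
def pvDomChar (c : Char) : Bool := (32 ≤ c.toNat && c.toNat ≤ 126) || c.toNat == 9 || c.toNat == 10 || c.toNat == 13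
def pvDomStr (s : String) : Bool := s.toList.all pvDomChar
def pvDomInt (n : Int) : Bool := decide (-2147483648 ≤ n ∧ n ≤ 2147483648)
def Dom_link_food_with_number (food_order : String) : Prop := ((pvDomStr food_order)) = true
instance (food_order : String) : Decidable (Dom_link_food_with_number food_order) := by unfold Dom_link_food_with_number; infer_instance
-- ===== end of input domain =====

-- B replaces A's counter-driven while/for scan over the dict keys by a bounds check
-- plus direct indexing keys[n-1] (objective: simpler).

-- ===== PORT A =====
-- the keys of meals_dict_global, in insertion order
def pvMeals : List String :=
  ["Chicken Salad Sandwich", "Turkey Sandwich", "Asparagus Soup", "Tortilla Soup", "Harvest Salad"]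

-- the inner 'for item in meals_dict_global.keys()': returns the item if count hits n, else the updated count
def pvForLoop : List String → Int → Int → Option String × Int
  | [], count, _ => (none, count)
  | item :: rest, count, n => if count = n then (some item, count) else pvForLoop rest (count + 1) n

-- the outer 'while count <= len(...)': count strictly increases by 5 each pass, so fuel 6 is more than enough
def pvWhileLoop : Nat → Int → Int → Option String
  | 0, _, _ => none
  | fuel + 1, count, n =>
    if count ≤ (pvMeals.length : Int) then
      match pvForLoop pvMeals count n with
      | (some item, _) => some item
      | (none, c) => pvWhileLoop fuel c n
    else none

def link_food_with_number (food_order : String) : Option String :=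
  match PySem.Int.ofStr? food_order with
  | some n => pvWhileLoop 6 1 n
  | none => none   -- unreachable under Pre_ (Python raises ValueError here)

-- ===== PORT B =====
def link_food_with_number_alt (food_order : String) : Option String :=
  match PySem.Int.ofStr? food_order with
  | some n =>
    if 1 ≤ n ∧ n ≤ (pvMeals.length : Int) then PySem.List.pyGet? pvMeals (n - 1) else none
  | none => none   -- unreachable under Pre_ (Python raises ValueError here)

-- ===== PRECONDITION & SPEC =====
-- Pre_ excludes exactly the strings int() cannot parse, where both A and B raise ValueError.
def Pre_link_food_with_number (food_order : String) : Prop :=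
  (PySem.Int.ofStr? food_order).isSome = true
instance (food_order : String) : Decidable (Pre_link_food_with_number food_order) := by
  unfold Pre_link_food_with_number; infer_instance

def pvWitness_link_food_with_number : String := "3"

def Spec_link_food_with_number (food_order : String) (out : Option String) : Prop := out = link_food_with_number_alt food_order
instance (food_order : String) (out : Option String) : Decidable (Spec_link_food_with_number food_order out) := by unfold Spec_link_food_with_number; infer_instance

-- ===== CLAIM (what is proved, stated in full; the proofs are below) =====
def Claim_equal_link_food_with_number : Prop := ∀ (food_order : String), Dom_link_food_with_number food_order → Pre_link_food_with_number food_order → Spec_link_food_with_number food_order (link_food_with_number food_order)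

-- ===== LEMMAS AND PROOFS =====
theorem pvLoop_eq (n : Int) :
    pvWhileLoop 6 1 n =
      (if 1 ≤ n ∧ n ≤ (pvMeals.length : Int) then PySem.List.pyGet? pvMeals (n - 1) else none) := by
  have hlen : (pvMeals.length : Int) = 5 := by norm_num [pvMeals]
  rw [hlen]
  by_cases h : 1 ≤ n ∧ n ≤ 5
  · obtain ⟨h1, h2⟩ := h
    interval_cases n <;> decide
  · rw [if_neg h]
    have e : pvForLoop pvMeals 1 n = (none, 6) := by
      simp only [pvMeals, pvForLoop]
      rw [if_neg (by omega), if_neg (by omega), if_neg (by omega), if_neg (by omega),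
        if_neg (by omega)]
      norm_num
    have hl : pvMeals.length = 5 := by norm_num [pvMeals]
    simp only [pvWhileLoop, e, hl]
    norm_num

-- ===== VERDICT (by name: the statement is the Claim_ definition above) =====
theorem link_food_with_number_spec : Claim_equal_link_food_with_number := by
  intro food_order _ hpre
  unfold Spec_link_food_with_number link_food_with_number link_food_with_number_alt
  cases h : PySem.Int.ofStr? food_order with
  | none => simp [Pre_link_food_with_number, h] at hpre
  | some n => simpa using pvLoop_eq n
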